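-- pv_equiv track=rewrite | github.com/YegorDB/THPoker | thpoker/hardcore.py | get_str_index
-- ===== SOURCE A (Python) =====
-- def get_str_index(weights):
--     if 14 in weights:  # add 1 if there are an Ace
--         weights.insert(0, 1)
--
--     rank = ['0'] * 14
--     for w in weights:
--         rank[w - 1] = '1'
--     rank = ''.join(rank)
--
--     if not '11111' in rank:
--        return 0
--
--     i = rank.rfind('11111')
--     index = rank[:i].count('1') + 4
--     return index
-- ===== SOURCE B (Python) =====
-- def get_str_index(weights):
--     if 14 in weights:  # add low Ace, mutating the argument exactly as A does
--         weights.insert(0, 1)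
--     marked = [False] * 14
--     for w in weights:
--         marked[w - 1] = True
--     pos = [i for i in range(14) if marked[i]]  # occupied slots, ascending
--     for k in range(len(pos) - 1, 3, -1):
--         if pos[k] - pos[k - 4] == 4:  # five consecutive occupied slots end at pos[k]
--             return k
--     return 0
-- ===== Notes on version B (the rewrite author's own statement) =====
-- stated objective: alternative
-- what changed: B drops A's string machinery entirely (joining a '0'/'1' rank string, '11111' substring containment, rfind and prefix character counting): it lists the occupied rank slots in ascending order and scans that compressed list from the top for the gap condition pos[k] - pos[k-4] == 4, returning the list index k directly.
import Mathlib
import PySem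

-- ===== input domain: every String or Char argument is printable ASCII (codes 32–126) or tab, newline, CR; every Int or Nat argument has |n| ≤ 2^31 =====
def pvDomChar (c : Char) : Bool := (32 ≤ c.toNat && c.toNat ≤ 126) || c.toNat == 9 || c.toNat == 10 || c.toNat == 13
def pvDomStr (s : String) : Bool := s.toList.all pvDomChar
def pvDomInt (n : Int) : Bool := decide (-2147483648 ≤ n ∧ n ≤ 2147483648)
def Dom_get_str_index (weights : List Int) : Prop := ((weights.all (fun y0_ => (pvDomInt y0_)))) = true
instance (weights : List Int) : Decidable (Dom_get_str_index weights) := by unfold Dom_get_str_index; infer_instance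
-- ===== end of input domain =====

-- B replaces A's '11111' substring search over a joined bit-string (rfind + prefix character
-- count) by a gap test pos[k] - pos[k-4] == 4 on the ascending list of occupied rank slots,
-- returning the slot's list index directly.
-- Note: both A and B mutate the argument (weights.insert(0, 1)); the claim is about the return value.


-- ===== PORT A =====
def get_str_index (weights : List Int) : Int :=
  let wts := if (14 : Int) ∈ weights then (1 : Int) :: weights else weights
  -- rank = ['0'] * 14; for w in weights: rank[w - 1] = '1'   (pySetD wraps a negative index
  -- exactly as Python does; Pre_ keeps the index between -14 and 13, where Python does not raise)
  let rank : List Char :=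
    wts.foldl (fun r w => PySem.List.pySetD r (w - 1) '1') (List.replicate 14 '0')
  -- rank = ''.join(rank): the port keeps the string as its List Char (exact: each piece is one char)
  if ¬ (PySem.Chars.isIn ['1','1','1','1','1'] rank = true) then 0
  else
    (PySem.Chars.count (PySem.Chars.slice rank none
       (some (PySem.Chars.rfind rank ['1','1','1','1','1']))) ['1'] : Int) + 4

-- ===== PORT B =====
-- for k in range(len(pos) - 1, 3, -1): if pos[k] - pos[k - 4] == 4: return k
-- (pos[k] / pos[k - 4] are in range for every k the loop visits — k ∈ [4, len(pos)-1] —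
--  so the total pyGetD is exact)
def altLoop (pos : List Int) : List Int → Int
  | [] => 0
  | k :: ks =>
    if PySem.List.pyGetD pos k 0 - PySem.List.pyGetD pos (k - 4) 0 == 4 then k
    else altLoop pos ks

def get_str_index_alt (weights : List Int) : Int :=
  let wts := if (14 : Int) ∈ weights then (1 : Int) :: weights else weights
  -- marked = [False] * 14; for w in weights: marked[w - 1] = True   (same Python write as A)
  let marked : List Bool :=
    wts.foldl (fun r w => PySem.List.pySetD r (w - 1) true) (List.replicate 14 false)
  -- pos = [i for i in range(14) if marked[i]]
  let pos : List Int :=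
    (PySem.List.pyRange 0 14 1).foldl
      (fun acc i => if PySem.List.pyGetD marked i false then acc ++ [i] else acc) []
  altLoop pos (PySem.List.pyRange ((pos.length : Int) - 1) 3 (-1))

-- ===== PRECONDITION & SPEC =====
-- Pre_ admits exactly the inputs on which A returns normally: a weight above 14 or below -13
-- makes A's rank[w - 1] assignment raise IndexError (nonpositive weights down to -13 write through
-- Python's negative-index wraparound, which B's identical table write shares).
def Pre_get_str_index (weights : List Int) : Prop := ∀ w ∈ weights, -13 ≤ w ∧ w ≤ 14
instance (weights : List Int) : Decidable (Pre_get_str_index weights) := by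
  unfold Pre_get_str_index; infer_instance

def pvWitness_get_str_index : List Int := [10, 11, 12, 13, 14, 2]

def Spec_get_str_index (weights : List Int) (out : Int) : Prop := out = get_str_index_alt weights
instance (weights : List Int) (out : Int) : Decidable (Spec_get_str_index weights out) := by
  unfold Spec_get_str_index; infer_instance

-- ===== CLAIM (what is proved, stated in full; the proofs are below) =====
def Claim_equal_get_str_index : Prop := ∀ (weights : List Int), Dom_get_str_index weights → Pre_get_str_index weights → Spec_get_str_index weights (get_str_index weights)

-- ===== LEMMAS AND PROOFS =====

-- the '0'/'1' indicator character of one bit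
def pvInd (b : Bool) : Char := if b then '1' else '0'

-- membership bit-mask of the (post-insertion) weights list, with Python's wraparound:
-- slot i is set iff weight i+1 or weight i+1-14 occurs
def maskOf (wts : List Int) : List Bool :=
  (List.range 14).map
    (fun i => decide ((((i : Nat) : Int) + 1) ∈ wts ∨ (((i : Nat) : Int) + 1 - 14) ∈ wts))

-- five consecutive bits of the mask are set, starting at position j (abbrev: keeps
-- Decidable inference available for Nat.findGreatest without a separate instance)
abbrev runAt (m : List Bool) (j : Nat) : Prop :=
  j + 5 ≤ m.length ∧ ∀ k < 5, m.getD (j + k) false = true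

-- ascending list of occupied slots of the mask
def natPos (m : List Bool) : List Nat :=
  (List.range 14).filter (fun i => m.getD i false)

-- the length-14 table holding `one` exactly where the predicate holds of the slot's weight
def indicPv {α : Type} (zero one : α) (p : Int → Bool) : List α :=
  (List.range 14).map (fun i => if p (((i : Nat) : Int) + 1) then one else zero)

lemma pySet_indic {α : Type} (zero one : α) (p : Int → Bool) (w : Int)
    (h1 : -13 ≤ w) (h2 : w ≤ 14) :
    PySem.List.pySetD (indicPv zero one p) (w - 1) one
      = indicPv zero one (fun v => p v || decide (v = w ∨ v = w + 14)) := by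
  have hlen : (indicPv zero one p).length = 14 := by simp [indicPv]
  by_cases hw : 1 ≤ w
  · rw [PySem.List.pySetD_of_nonneg _ _ (by omega : (0:Int) ≤ w - 1)]
    apply List.ext_getElem
    · simp [indicPv]
    · intro i hi _
      simp only [indicPv, List.length_set, List.length_map, List.length_range] at hi
      simp only [indicPv, List.getElem_set, List.getElem_map, List.getElem_range]
      by_cases hv : ((i : Nat) : Int) + 1 = w
      · rw [if_pos (by omega : (w - 1).toNat = i)]
        simp [hv]
      · rw [if_neg (by omega : ¬ (w - 1).toNat = i)]
        have hv14 : ¬ (((i : Nat) : Int) + 1 = w + 14) := by omega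
        simp [hv, hv14]
  · have hset : PySem.List.pySetD (indicPv zero one p) (w - 1) one
        = (indicPv zero one p).set (w + 13).toNat one := by
      unfold PySem.List.pySetD PySem.List.pySet? PySem.List.pyIdx?
      rw [hlen]
      rw [if_neg (by omega : ¬ (0:Int) ≤ w - 1)]
      have hc : -(((14:Nat)):Int) ≤ w - 1 := by push_cast; omega
      rw [if_pos hc]
      have : 14 - (-(w - 1)).toNat = (w + 13).toNat := by omega
      rw [this]
      rfl
    rw [hset]
    apply List.ext_getElem
    · simp [indicPv]
    · intro i hi _
      simp only [indicPv, List.length_set, List.length_map, List.length_range] at hi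
      simp only [indicPv, List.getElem_set, List.getElem_map, List.getElem_range]
      by_cases hv : ((i : Nat) : Int) + 1 = w + 14
      · rw [if_pos (by omega : (w + 13).toNat = i)]
        simp [hv]
      · rw [if_neg (by omega : ¬ (w + 13).toNat = i)]
        have hvw : ¬ (((i : Nat) : Int) + 1 = w) := by omega
        simp [hv, hvw]

lemma foldl_rank {α : Type} (zero one : α) (wts : List Int)
    (h : ∀ w ∈ wts, -13 ≤ w ∧ w ≤ 14) (p : Int → Bool) :
    wts.foldl (fun r w => PySem.List.pySetD r (w - 1) one) (indicPv zero one p)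
      = indicPv zero one (fun v => p v || decide (v ∈ wts ∨ v - 14 ∈ wts)) := by
  induction wts generalizing p with
  | nil => simp [indicPv]
  | cons w ws ih =>
    simp only [List.foldl_cons]
    rw [pySet_indic zero one p w (h w (by simp)).1 (h w (by simp)).2,
        ih (fun x hx => h x (by simp [hx]))]
    unfold indicPv
    apply List.map_congr_left
    intro i _
    have hiff : ((((i : Nat) : Int) + 1 = w ∨ ((i : Nat) : Int) + 1 = w + 14)
          ∨ (((i : Nat) : Int) + 1 ∈ ws ∨ ((i : Nat) : Int) + 1 - 14 ∈ ws))
        ↔ ((((i : Nat) : Int) + 1 ∈ w :: ws) ∨ (((i : Nat) : Int) + 1 - 14 ∈ w :: ws)) := by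
      simp only [List.mem_cons]
      constructor
      · rintro ((h1 | h1) | (h1 | h1))
        · exact Or.inl (Or.inl h1)
        · refine Or.inr (Or.inl ?_)
          omega
        · exact Or.inl (Or.inr h1)
        · exact Or.inr (Or.inr h1)
      · rintro ((h1 | h1) | (h1 | h1))
        · exact Or.inl (Or.inl h1)
        · exact Or.inr (Or.inl h1)
        · refine Or.inl (Or.inr ?_)
          omega
        · exact Or.inr (Or.inr h1)
    have hbool : ((p (((i : Nat) : Int) + 1)
          || decide ((((i : Nat) : Int) + 1) = w ∨ (((i : Nat) : Int) + 1) = w + 14))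
          || decide ((((i : Nat) : Int) + 1) ∈ ws ∨ (((i : Nat) : Int) + 1) - 14 ∈ ws))
        = (p (((i : Nat) : Int) + 1)
          || decide ((((i : Nat) : Int) + 1) ∈ w :: ws ∨ (((i : Nat) : Int) + 1) - 14 ∈ w :: ws)) := by
      rw [Bool.eq_iff_iff]
      simp only [Bool.or_eq_true, decide_eq_true_eq, or_assoc]
      exact or_congr_right (or_assoc.symm.trans hiff)
    simp only [hbool]

lemma rank_eq_mask (wts : List Int) (h : ∀ w ∈ wts, -13 ≤ w ∧ w ≤ 14) :
    wts.foldl (fun r w => PySem.List.pySetD r (w - 1) '1') (List.replicate 14 '0')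
      = (maskOf wts).map pvInd := by
  have h0 : (List.replicate 14 '0' : List Char) = indicPv '0' '1' (fun _ => false) := by
    simp [indicPv]
  rw [h0, foldl_rank '0' '1' wts h]
  simp [indicPv, maskOf, pvInd, List.map_map, Function.comp]

lemma bits_eq_mask (wts : List Int) (h : ∀ w ∈ wts, -13 ≤ w ∧ w ≤ 14) :
    wts.foldl (fun r w => PySem.List.pySetD r (w - 1) true) (List.replicate 14 false)
      = maskOf wts := by
  have h0 : (List.replicate 14 false) = indicPv false true (fun _ => false) := by
    simp [indicPv]
  rw [h0, foldl_rank false true wts h]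
  simp [indicPv, maskOf]

-- ## A-side: characterising '11111' search on the indicator list

lemma prefix_five_iff (m : List Bool) (j : Nat) :
    ['1','1','1','1','1'] <+: (m.map pvInd).drop j ↔ runAt m j := by
  have hd : (m.map pvInd).drop j = (m.drop j).map pvInd := by
    rw [List.map_drop]
  rw [hd]
  constructor
  · rintro ⟨t, ht⟩
    have hlen := congrArg List.length ht
    simp at hlen
    have hle : j + 5 ≤ m.length := by omega
    refine ⟨hle, ?_⟩
    intro k hk
    have hk' : k < ((m.drop j).map pvInd).length := by simp; omega
    have h1 := List.getElem_of_eq ht.symm hk'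
    have hk5 : k < (['1','1','1','1','1'] : List Char).length := by simpa using hk
    rw [List.getElem_append_left hk5] at h1
    rw [List.getElem_map, List.getElem_drop] at h1
    have hjk : j + k < m.length := by omega
    rw [List.getD_eq_getElem _ _ hjk]
    have h2 : pvInd m[j + k] = '1' := by
      rw [h1]
      interval_cases k <;> rfl
    revert h2
    unfold pvInd
    cases m[j + k] <;> simp
  · rintro ⟨hle, hbit⟩
    rw [List.prefix_iff_eq_take]
    apply List.ext_getElem
    · simp; omega
    · intro k hk1 hk2
      have hk5 : k < 5 := by simpa using hk1
      have hjk : j + k < m.length := by omega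
      have h2 : (List.take (['1','1','1','1','1'] : List Char).length
          ((m.drop j).map pvInd))[k]'hk2 = pvInd (m[j + k]'hjk) := by
        simp [List.getElem_take, List.getElem_drop, List.getElem_map]
      rw [h2]
      have h3 := hbit k hk5
      rw [List.getD_eq_getElem _ _ hjk] at h3
      rw [h3]
      interval_cases k <;> rfl

lemma rfind_go_found (s sub : List Char) (j0 : Nat) (hj : sub <+: s.drop j0) :
    ∀ x : Nat, j0 ≤ x → (∀ j, j0 < j → j ≤ x → ¬ sub <+: s.drop j) →
      PySem.Chars.rfind.go s sub x = (j0 : Int) := by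
  intro x
  induction x with
  | zero =>
    intro hx _
    have hj0 : j0 = 0 := by omega
    subst hj0
    have : sub.isPrefixOf s = true := by
      rw [List.isPrefixOf_iff_prefix]; simpa using hj
    simp [PySem.Chars.rfind.go, this]
  | succ n ih =>
    intro hx hmax
    by_cases he : j0 = n + 1
    · subst he
      have : sub.isPrefixOf (s.drop (n + 1)) = true := by
        rw [List.isPrefixOf_iff_prefix]; exact hj
      simp [PySem.Chars.rfind.go, this]
    · have hlt : j0 ≤ n := by omega
      have hn : ¬ sub.isPrefixOf (s.drop (n + 1)) = true := by
        rw [List.isPrefixOf_iff_prefix]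
        exact hmax (n + 1) (by omega) (le_refl _)
      simp only [PySem.Chars.rfind.go]
      rw [if_neg hn]
      exact ih hlt (fun j h1 h2 => hmax j h1 (by omega))

lemma count_go_one (l : List Char) :
    ∀ (fuel acc : Nat), l.length ≤ fuel →
      PySem.Chars.count.go ['1'] fuel l acc = acc + l.count '1' := by
  induction l with
  | nil =>
    intro fuel acc _
    cases fuel <;> simp [PySem.Chars.count.go]
  | cons h t ih =>
    intro fuel acc hf
    cases fuel with
    | zero => simp at hf
    | succ f =>
      have hp : (['1'] : List Char).isPrefixOf (h :: t) = ('1' == h) := by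
        simp [List.isPrefixOf]
      by_cases hh : h = '1'
      · subst hh
        have hpt : (['1'] : List Char).isPrefixOf ('1' :: t) = true := by rw [hp]; rfl
        simp only [PySem.Chars.count.go, hpt, if_true]
        have hdrop : List.drop (['1'] : List Char).length ('1' :: t) = t := by simp
        rw [hdrop, ih f (acc + 1) (by simpa using hf), List.count_cons_self]
        omega
      · have hne : ('1' : Char) ≠ h := fun e => hh e.symm
        have hpt : ¬ (['1'] : List Char).isPrefixOf (h :: t) = true := by
          rw [hp]
          simpa using hne
        simp only [PySem.Chars.count.go]
        rw [if_neg hpt, ih f acc (by simpa using hf), List.count_cons_of_ne hh]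

lemma count_one (s : List Char) : PySem.Chars.count s ['1'] = s.count '1' := by
  have : (['1'] : List Char).isEmpty = false := rfl
  simp [PySem.Chars.count, this, count_go_one s s.length 0 (le_refl _)]

lemma count_map_ind (m : List Bool) : (m.map pvInd).count '1' = m.count true := by
  induction m with
  | nil => rfl
  | cons b t ih =>
    cases b <;> simp [pvInd, ih]

lemma slice_take {α : Type} (s : List α) (i : Int) (h0 : 0 ≤ i) :
    PySem.List.slice s none (some i) = s.take i.toNat := by
  simp only [PySem.List.slice, PySem.List.clampIdx]
  rw [if_neg (by omega : ¬ i < 0)]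
  simp only [List.drop_zero, Nat.sub_zero]
  rcases Nat.lt_or_ge s.length i.toNat with h | h
  · rw [min_eq_right (by omega), List.take_length, List.take_of_length_le (by omega)]
  · rw [min_eq_left h]

lemma cnt_run (m : List Bool) (j0 : Nat) (hr : runAt m j0) :
    (m.take (j0 + 4)).count true = (m.take j0).count true + 4 := by
  obtain ⟨hle, hbit⟩ := hr
  rw [List.take_add, List.count_append]
  have h4 : (m.drop j0).take 4 = List.replicate 4 true := by
    apply List.ext_getElem
    · simp; omega
    · intro k hk _
      simp only [List.length_take, List.length_drop, lt_min_iff] at hk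
      have hk4 : k < 4 := hk.1
      have hjk : j0 + k < m.length := by omega
      rw [List.getElem_take, List.getElem_drop, List.getElem_replicate]
      have := hbit k (by omega)
      rwa [List.getD_eq_getElem _ _ hjk] at this
  rw [h4]
  simp

lemma runAt_le (m : List Bool) (hm : m.length = 14) (j : Nat) (h : runAt m j) : j ≤ 9 := by
  have := h.1; omega

-- ## B-side: the occupied-slot list and the gap test

-- the comprehension builds exactly the slot list (as Ints)
lemma pos_build (m : List Bool) :
    (PySem.List.pyRange 0 14 1).foldl
        (fun acc i => if PySem.List.pyGetD m i false then acc ++ [i] else acc) []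
      = (natPos m).map (fun i => ((i : Nat) : Int)) := by
  rw [PySem.List.foldl_append_if_eq_filter, List.nil_append,
      show ((14 : Int)) = ((14 : Nat) : Int) from by norm_num,
      PySem.List.pyRange_zero_natCast, List.filter_map]
  unfold natPos
  congr 1
  apply List.filter_congr
  intro i _
  simp [PySem.List.pyGetD_natCast]

lemma natPos_pairwise (m : List Bool) : (natPos m).Pairwise (· < ·) := by
  exact List.Pairwise.filter _ List.pairwise_lt_range

lemma natPos_lt14 (m : List Bool) : ∀ i ∈ natPos m, i < 14 := by
  intro i hi
  have := List.mem_range.1 (List.mem_of_mem_filter hi)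
  omega

lemma mem_natPos (m : List Bool) (i : Nat) :
    i ∈ natPos m ↔ i < 14 ∧ m.getD i false = true := by
  simp [natPos, List.mem_filter, List.mem_range]

-- index monotonicity helpers on the strictly increasing slot list
lemma natPos_mono (m : List Bool) {i j : Nat} (hij : i < j) (hj : j < (natPos m).length) :
    (natPos m)[i]'(by omega) < (natPos m)[j] := by
  exact List.pairwise_iff_getElem.1 (natPos_pairwise m) i j (by omega) hj hij

lemma natPos_mono_le (m : List Bool) {i j : Nat} (hij : i ≤ j) (hj : j < (natPos m).length) :
    (natPos m)[i]'(by omega) ≤ (natPos m)[j] := by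
  rcases Nat.lt_or_ge i j with h | h
  · exact le_of_lt (natPos_mono m h hj)
  · have : i = j := by omega
    subst this
    exact le_refl _

lemma natPos_idx_lt (m : List Bool) {i j : Nat} (hi : i < (natPos m).length)
    (hj : j < (natPos m).length) (hv : (natPos m)[i] < (natPos m)[j]) : i < j := by
  by_contra h
  have hle : j ≤ i := by omega
  have := natPos_mono_le m hle hi
  omega

-- the k-th occupied slot has exactly k occupied slots below it
lemma count_take_eq (m : List Bool) (hm : m.length = 14) (s : Nat) (hs : s ≤ 14) :
    (m.take s).count true = (List.range s).countP (fun i => m.getD i false) := by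
  induction s with
  | zero => simp
  | succ n ih =>
    have hn : n < m.length := by omega
    rw [List.take_add_one, List.count_append, List.range_succ, List.countP_append,
        ih (by omega)]
    have h1 : m[n]?.toList = [m[n]] := by
      rw [List.getElem?_eq_getElem hn]
      rfl
    rw [h1]
    have h2 : m.getD n false = m[n] := List.getD_eq_getElem m false hn
    simp only [List.countP_cons, List.countP_nil, List.count_cons, List.count_nil, h2]
    cases m[n] <;> simp

lemma idx_count (m : List Bool) :
    ∀ k, (hk : k < (natPos m).length) →
      (List.range ((natPos m)[k])).countP (fun i => m.getD i false) = k := by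
  intro k
  induction k with
  | zero =>
    intro hk
    rw [List.countP_eq_zero]
    intro i hi hf
    have hilt : i < (natPos m)[0] := List.mem_range.1 hi
    have hi14 : i < 14 := by
      have := natPos_lt14 m _ (List.getElem_mem hk)
      omega
    have hmem : i ∈ natPos m := (mem_natPos m i).2 ⟨hi14, hf⟩
    obtain ⟨j, hj, hji⟩ := List.mem_iff_getElem.1 hmem
    have := natPos_mono_le m (Nat.zero_le j) hj
    omega
  | succ k ih =>
    intro hk
    have hk' : k < (natPos m).length := by omega
    have ihk := ih hk'
    have hlt : (natPos m)[k] < (natPos m)[k + 1] := natPos_mono m (by omega) hk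
    have aux : ∀ d, (natPos m)[k] + 1 + d ≤ (natPos m)[k + 1] →
        (List.range ((natPos m)[k] + 1 + d)).countP (fun i => m.getD i false) = k + 1 := by
      intro d
      induction d with
      | zero =>
        intro _
        rw [show (natPos m)[k] + 1 + 0 = (natPos m)[k] + 1 from rfl, List.range_succ,
            List.countP_append, ihk]
        have hfk : m.getD ((natPos m)[k]) false = true :=
          ((mem_natPos m _).1 (List.getElem_mem hk')).2
        simp only [List.getD] at hfk
        simp [hfk]
      | succ d ihd =>
        intro hd
        rw [show (natPos m)[k] + 1 + (d + 1) = ((natPos m)[k] + 1 + d) + 1 from by omega,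
            List.range_succ, List.countP_append, ihd (by omega)]
        have hfs : m.getD ((natPos m)[k] + 1 + d) false = false := by
          by_contra hf
          simp only [Bool.not_eq_false] at hf
          have hs14 : (natPos m)[k] + 1 + d < 14 := by
            have := natPos_lt14 m _ (List.getElem_mem hk)
            omega
          have hmem : ((natPos m)[k] + 1 + d) ∈ natPos m := (mem_natPos m _).2 ⟨hs14, hf⟩
          obtain ⟨j, hj, hji⟩ := List.mem_iff_getElem.1 hmem
          have hgt : k < j := natPos_idx_lt m hk' hj (by omega)
          have hlt2 : j < k + 1 := natPos_idx_lt m hj hk (by omega)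
          omega
        simp only [List.getD] at hfs
        simp [hfs]
    have he : (natPos m)[k] + 1 + ((natPos m)[k + 1] - (natPos m)[k] - 1) = (natPos m)[k + 1] := by
      omega
    rw [← he]
    exact aux _ (by omega)

-- the gap test at index k is exactly a 5-run of slots ending at slot (natPos m)[k]
lemma gap_iff_run (m : List Bool) (hm : m.length = 14) (k : Nat) (hk4 : 4 ≤ k)
    (hk : k < (natPos m).length) :
    ((natPos m)[k - 4]'(by omega) + 4 = (natPos m)[k]) ↔ runAt m ((natPos m)[k] - 4) := by
  have h14 : (natPos m)[k] < 14 := natPos_lt14 m _ (List.getElem_mem hk)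
  have h1 : (natPos m)[k - 4]'(by omega) < (natPos m)[k - 3]'(by omega) :=
    natPos_mono m (by omega) (by omega)
  have h2 : (natPos m)[k - 3]'(by omega) < (natPos m)[k - 2]'(by omega) :=
    natPos_mono m (by omega) (by omega)
  have h3 : (natPos m)[k - 2]'(by omega) < (natPos m)[k - 1]'(by omega) :=
    natPos_mono m (by omega) (by omega)
  have h4 : (natPos m)[k - 1]'(by omega) < (natPos m)[k] := natPos_mono m (by omega) hk
  have hbit : ∀ j, (hj : j < (natPos m).length) → m.getD ((natPos m)[j]) false = true :=
    fun j hj => ((mem_natPos m _).1 (List.getElem_mem hj)).2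
  constructor
  · intro heq
    refine ⟨by omega, ?_⟩
    intro i hi
    interval_cases i
    · rw [show (natPos m)[k] - 4 + 0 = (natPos m)[k - 4]'(by omega) from by omega]
      exact hbit _ _
    · rw [show (natPos m)[k] - 4 + 1 = (natPos m)[k - 3]'(by omega) from by omega]
      exact hbit _ _
    · rw [show (natPos m)[k] - 4 + 2 = (natPos m)[k - 2]'(by omega) from by omega]
      exact hbit _ _
    · rw [show (natPos m)[k] - 4 + 3 = (natPos m)[k - 1]'(by omega) from by omega]
      exact hbit _ _
    · rw [show (natPos m)[k] - 4 + 4 = (natPos m)[k] from by omega]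
      exact hbit _ hk
  · rintro ⟨hle, hrun⟩
    -- each of the four slots below (natPos m)[k] is occupied, hence is the previous entry
    have hmem : ∀ i, i ≤ 4 → ((natPos m)[k] - 4 + i) ∈ natPos m := by
      intro i hi
      refine (mem_natPos m _).2 ⟨by omega, ?_⟩
      exact hrun i (by omega)
    have hstep : ∀ j x, (hj : j < (natPos m).length) → 1 ≤ j → x ∈ natPos m →
        x < (natPos m)[j] → x ≤ (natPos m)[j - 1]'(by omega) := by
      intro j x hj hj1 hx hxlt
      obtain ⟨i, hi, hix⟩ := List.mem_iff_getElem.1 hx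
      have : i < j := natPos_idx_lt m hi hj (by omega)
      have := natPos_mono_le m (by omega : i ≤ j - 1) (by omega : j - 1 < (natPos m).length)
      omega
    have hge : 4 ≤ (natPos m)[k] := by omega
    have e1 : (natPos m)[k - 1]'(by omega) = (natPos m)[k] - 1 := by
      have := hstep k ((natPos m)[k] - 1) hk (by omega) (by
        have := hmem 3 (by omega)
        rwa [show (natPos m)[k] - 4 + 3 = (natPos m)[k] - 1 from by omega] at this) (by omega)
      omega
    have e2 : (natPos m)[k - 2]'(by omega) = (natPos m)[k] - 2 := by
      have := hstep (k - 1) ((natPos m)[k] - 2) (by omega) (by omega) (by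
        have := hmem 2 (by omega)
        rwa [show (natPos m)[k] - 4 + 2 = (natPos m)[k] - 2 from by omega] at this) (by omega)
      simp only [show k - 1 - 1 = k - 2 from by omega] at this
      omega
    have e3 : (natPos m)[k - 3]'(by omega) = (natPos m)[k] - 3 := by
      have := hstep (k - 2) ((natPos m)[k] - 3) (by omega) (by omega) (by
        have := hmem 1 (by omega)
        rwa [show (natPos m)[k] - 4 + 1 = (natPos m)[k] - 3 from by omega] at this) (by omega)
      simp only [show k - 2 - 1 = k - 3 from by omega] at this
      omega
    have e4 : (natPos m)[k - 4]'(by omega) = (natPos m)[k] - 4 := by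
      have := hstep (k - 3) ((natPos m)[k] - 4) (by omega) (by omega) (by
        have := hmem 0 (by omega)
        rwa [show (natPos m)[k] - 4 + 0 = (natPos m)[k] - 4 from by omega] at this) (by omega)
      simp only [show k - 3 - 1 = k - 4 from by omega] at this
      omega
    omega

-- reading pos[k] in the loop (k in range, so the total pyGetD is the plain list entry)
lemma pyGet_pos (m : List Bool) (k : Nat) (hk : k < (natPos m).length) :
    PySem.List.pyGetD ((natPos m).map (fun i => ((i : Nat) : Int))) ((k : Nat) : Int) 0
      = (((natPos m)[k] : Nat) : Int) := by
  rw [PySem.List.pyGetD_natCast]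
  rw [List.getD_eq_getElem _ _ (by simpa using hk)]
  simp

-- the loop's gap test at index k, as a run condition
lemma cond_eval (m : List Bool) (hm : m.length = 14) (k : Nat) (hk4 : 4 ≤ k)
    (hk : k < (natPos m).length) :
    ((PySem.List.pyGetD ((natPos m).map (fun i => ((i : Nat) : Int))) ((k : Nat) : Int) 0
        - PySem.List.pyGetD ((natPos m).map (fun i => ((i : Nat) : Int))) (((k : Nat) : Int) - 4) 0
        == 4) = true)
      ↔ runAt m ((natPos m)[k] - 4) := by
  have hc : (((k : Nat) : Int) - 4) = (((k - 4 : Nat) : Nat) : Int) := by omega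
  rw [hc, pyGet_pos m k hk, pyGet_pos m (k - 4) (by omega)]
  rw [← gap_iff_run m hm k hk4 hk]
  have hmono := natPos_mono m (show k - 4 < k from by omega) hk
  constructor
  · intro h
    rw [beq_iff_eq] at h
    omega
  · intro h
    rw [beq_iff_eq]
    omega

-- the loop: countdown over k = len-1 … 4, first index whose gap test fires
lemma altLoop_none (m : List Bool) (hm : m.length = 14)
    (hnone : ∀ j, ¬ runAt m j) :
    ∀ c : Nat, (3 + (c : Int)) ≤ ((natPos m).length : Int) - 1 →
      altLoop ((natPos m).map (fun i => ((i : Nat) : Int)))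
        (PySem.List.pyRange (3 + (c : Int)) 3 (-1)) = 0 := by
  intro c
  induction c with
  | zero =>
    intro _
    norm_num
    rfl
  | succ n ih =>
    intro hc
    rw [PySem.List.pyRange_neg_one_cons (by omega : (3 : Int) < 3 + ((n + 1 : Nat) : Int))]
    unfold altLoop
    have ht : (3 : Int) + ((n + 1 : Nat) : Int) = (((n + 4 : Nat) : Nat) : Int) := by
      push_cast; ring
    have hk : n + 4 < (natPos m).length := by
      have : ((n + 4 : Nat) : Int) < ((natPos m).length : Int) := by push_cast at hc ⊢; omega
      exact_mod_cast this
    rw [ht]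
    rw [if_neg (by
      intro hcond
      exact hnone _ ((cond_eval m hm (n + 4) (by omega) hk).1 hcond))]
    have ht2 : (((n + 4 : Nat) : Nat) : Int) - 1 = 3 + ((n : Nat) : Int) := by push_cast; ring
    rw [ht2]
    exact ih (by push_cast at hc ⊢; omega)

lemma altLoop_found (m : List Bool) (hm : m.length = 14) (j0 : Nat)
    (hrun : runAt m j0) (hmax : ∀ j, runAt m j → j ≤ j0)
    (kstar : Nat) (hks : kstar < (natPos m).length)
    (hkv : (natPos m)[kstar] = j0 + 4) (hk4 : 4 ≤ kstar) :
    ∀ c : Nat, kstar ≤ 3 + c → (3 + (c : Int)) ≤ ((natPos m).length : Int) - 1 →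
      altLoop ((natPos m).map (fun i => ((i : Nat) : Int)))
        (PySem.List.pyRange (3 + (c : Int)) 3 (-1)) = (kstar : Int) := by
  intro c
  induction c with
  | zero => intro h _; omega
  | succ n ih =>
    intro hn hc
    rw [PySem.List.pyRange_neg_one_cons (by omega : (3 : Int) < 3 + ((n + 1 : Nat) : Int))]
    unfold altLoop
    have ht : (3 : Int) + ((n + 1 : Nat) : Int) = (((n + 4 : Nat) : Nat) : Int) := by
      push_cast; ring
    have hk : n + 4 < (natPos m).length := by
      have : ((n + 4 : Nat) : Int) < ((natPos m).length : Int) := by push_cast at hc ⊢; omega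
      exact_mod_cast this
    rw [ht]
    by_cases he : kstar = n + 4
    · subst he
      rw [if_pos ((cond_eval m hm _ hk4 hk).2 (by
        rw [hkv]
        simpa using hrun))]
    · have hklt : kstar < n + 4 := by omega
      rw [if_neg (by
        intro hcond
        have hr := (cond_eval m hm (n + 4) (by omega) hk).1 hcond
        have hle := hmax _ hr
        -- the run's top slot is (natPos m)[n+4] = run start + 4 ≤ j0 + 4 = (natPos m)[kstar]
        have hge4 : 4 ≤ (natPos m)[n + 4] := by
          have := natPos_mono m (show n + 4 - 4 < n + 4 from by omega) hk
          have := (gap_iff_run m hm (n + 4) (by omega) hk).2 hr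
          omega
        have hvle : (natPos m)[n + 4] ≤ (natPos m)[kstar] := by omega
        have := natPos_mono m hklt hk
        omega)]
      have ht2 : (((n + 4 : Nat) : Nat) : Int) - 1 = 3 + ((n : Nat) : Int) := by push_cast; ring
      rw [ht2]
      exact ih (by omega) (by push_cast at hc ⊢; omega)

-- ## the two characterisations agree

lemma core_all (wts : List Int) :
    (if ¬ (PySem.Chars.isIn ['1','1','1','1','1'] ((maskOf wts).map pvInd) = true) then 0
     else
       (PySem.Chars.count (PySem.Chars.slice ((maskOf wts).map pvInd) none
          (some (PySem.Chars.rfind ((maskOf wts).map pvInd) ['1','1','1','1','1']))) ['1'] : Int) + 4)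
      = altLoop ((natPos (maskOf wts)).map (fun i => ((i : Nat) : Int)))
          (PySem.List.pyRange ((((natPos (maskOf wts)).map (fun i => ((i : Nat) : Int))).length : Int) - 1) 3 (-1)) := by
  set m := maskOf wts with hm'
  have hm : m.length = 14 := by simp [hm', maskOf]
  have hlenmap : (((natPos m).map (fun i => ((i : Nat) : Int))).length) = (natPos m).length := by
    simp
  rw [hlenmap]
  by_cases hex : ∃ j, runAt m j
  · -- a straight exists: both sides find the top one
    set j0 := Nat.findGreatest (runAt m) 9 with hj0
    obtain ⟨jw, hjw⟩ := hex
    have hjw9 : jw ≤ 9 := runAt_le m hm jw hjw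
    have hrun : runAt m j0 := Nat.findGreatest_spec hjw9 hjw
    have hmax : ∀ j, runAt m j → j ≤ j0 := by
      intro j hr
      by_contra hcon
      have hj9 : j ≤ 9 := runAt_le m hm j hr
      exact Nat.findGreatest_is_greatest (by omega : j0 < j) hj9 hr
    -- A side
    have hP : ['1','1','1','1','1'] <+: (m.map pvInd).drop j0 := (prefix_five_iff m j0).2 hrun
    have hisin : PySem.Chars.isIn ['1','1','1','1','1'] (m.map pvInd) = true := by
      rw [← PySem.Chars.exists_prefix_drop_iff_isIn]
      exact ⟨j0, hP⟩
    rw [if_neg (by simp [hisin])]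
    have hrfind : PySem.Chars.rfind (m.map pvInd) ['1','1','1','1','1'] = (j0 : Int) := by
      unfold PySem.Chars.rfind
      apply rfind_go_found _ _ j0 hP
      · simp [hm]
        have := Nat.findGreatest_le (P := runAt m) 9
        omega
      · intro j h1 h2
        rw [prefix_five_iff]
        intro hr
        have := hmax j hr
        omega
    rw [hrfind, PySem.Chars.slice_eq_listSlice, slice_take _ _ (Int.natCast_nonneg j0), count_one]
    have htn : ((j0 : Int)).toNat = j0 := by omega
    rw [htn]
    have hmap : (m.map pvInd).take j0 = (m.take j0).map pvInd := by
      rw [List.map_take]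
    rw [hmap, count_map_ind]
    -- B side: the index of slot j0 + 4 in the occupied-slot list
    have hmem : (j0 + 4) ∈ natPos m := by
      refine (mem_natPos m _).2 ⟨by have := hrun.1; omega, ?_⟩
      have := hrun.2 4 (by omega)
      simpa using this
    obtain ⟨kstar, hks, hkv⟩ := List.mem_iff_getElem.1 hmem
    -- kstar = number of occupied slots below j0 + 4 = (count below j0) + 4
    have hcnt : (m.take (j0 + 4)).count true = kstar := by
      rw [count_take_eq m hm (j0 + 4) (by have := hrun.1; omega), ← hkv]
      exact idx_count m kstar hks
    have hcnt4 : (m.take j0).count true + 4 = kstar := by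
      rw [← cnt_run m j0 hrun]
      exact hcnt
    have hk4 : 4 ≤ kstar := by omega
    have hn5 : 5 ≤ (natPos m).length := by omega
    have hstart : ((natPos m).length : Int) - 1 = 3 + (((natPos m).length - 4 : Nat) : Int) := by
      omega
    rw [hstart, altLoop_found m hm j0 hrun hmax kstar hks hkv hk4 ((natPos m).length - 4)
        (by omega) (by omega)]
    omega
  · -- no straight: both sides give 0
    push Not at hex
    have hisin : ¬ (PySem.Chars.isIn ['1','1','1','1','1'] (m.map pvInd) = true) := by
      rw [← PySem.Chars.exists_prefix_drop_iff_isIn]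
      rintro ⟨j, hj⟩
      exact hex j ((prefix_five_iff m j).1 hj)
    rw [if_pos (by simp [hisin])]
    by_cases hn : 4 ≤ (natPos m).length
    · have hstart : ((natPos m).length : Int) - 1 = 3 + (((natPos m).length - 4 : Nat) : Int) := by
        omega
      rw [hstart, altLoop_none m hm hex ((natPos m).length - 4) (by omega)]
    · rw [PySem.List.pyRange_neg_one_eq_nil (by omega)]
      rfl

-- ===== VERDICT (by name: the statement is the Claim_ definition above) =====
theorem get_str_index_spec : Claim_equal_get_str_index := by
  intro wts _ hpre
  unfold Spec_get_str_index
  simp only [get_str_index, get_str_index_alt]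
  have hpre' : ∀ w ∈ (if (14 : Int) ∈ wts then (1 : Int) :: wts else wts),
      -13 ≤ w ∧ w ≤ 14 := by
    split
    · intro w hw
      rcases List.mem_cons.1 hw with h | h
      · omega
      · exact hpre w h
    · exact hpre
  rw [rank_eq_mask _ hpre', bits_eq_mask _ hpre', pos_build]
  exact core_all (if (14 : Int) ∈ wts then (1 : Int) :: wts else wts)
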